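-- pv_equiv track=rewrite | github.com/jonas-scholz123/msci-project | src/topics.py | remove_partial_words
-- ===== SOURCE A (Python) =====
-- def remove_partial_words(keywords):
--     # remove e.g. "neural" and "net" if talking about neural_nets
--     to_remove = set()  # unique
--     for kw in keywords:
--         if "_" in kw:
--             partial_kws = kw.split("_")
--         else:
--             continue
--
--         for partial_kw in partial_kws:
--             if partial_kw in keywords:
--                 to_remove.add(partial_kw)
--     for w in to_remove:
--         keywords.remove(w)
--     return keywords
-- ===== SOURCE B (Python) =====
-- def remove_partial_words(keywords):
--     # Single pass: build the drop-set once, then rebuild the list skipping the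
--     # first occurrence of each dropped word; write back in place.
--     present = set(keywords)
--     drop = {p for kw in keywords if "_" in kw for p in kw.split("_") if p in present}
--     result = []
--     for w in keywords:
--         if w in drop:
--             drop.discard(w)
--         else:
--             result.append(w)
--     keywords[:] = result
--     return keywords
-- ===== Notes on version B (the rewrite author's own statement) =====
-- stated objective: alternative
-- what changed: B replaces A's per-part linear list-membership scans and per-word list.remove passes with a precomputed presence set, a set-comprehension drop-set, and one single pass that rebuilds the list skipping the first occurrence of each dropped word (written back with keywords[:]).
import Mathlib
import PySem

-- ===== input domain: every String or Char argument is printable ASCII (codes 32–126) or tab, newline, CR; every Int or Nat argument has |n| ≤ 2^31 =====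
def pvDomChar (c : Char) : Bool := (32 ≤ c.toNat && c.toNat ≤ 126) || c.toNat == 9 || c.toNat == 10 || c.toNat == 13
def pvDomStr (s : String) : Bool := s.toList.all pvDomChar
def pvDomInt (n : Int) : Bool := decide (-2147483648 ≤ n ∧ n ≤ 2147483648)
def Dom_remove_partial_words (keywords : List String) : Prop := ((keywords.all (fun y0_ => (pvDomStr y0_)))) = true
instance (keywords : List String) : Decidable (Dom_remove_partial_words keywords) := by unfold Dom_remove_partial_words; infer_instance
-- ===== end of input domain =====

-- B builds the drop-set once (as a set comprehension, with set membership) and then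
-- removes in one rebuilding pass instead of A's per-word list.remove calls. Both A and
-- B mutate the argument list in place in Python; the theorem is about the return value.

-- ===== PORT A =====
-- Python A iterates over the set `to_remove` calling keywords.remove(w); the final
-- list does not depend on that iteration order (removing the first occurrence of
-- pairwise-distinct words commutes), so folding in the Set's stored order is exact.
-- `(PySem.Str.split? kw "_").getD []`: split? is none only for sep = "", so it is
-- always `some` here. `(PySem.List.remove? l w).getD l`: remove? is some whenever
-- w ∈ l, which holds by construction here; the getD default is never reached.
def remove_partial_words (keywords : List String) : List String :=
  let to_remove : PySem.Set String :=
    keywords.foldl (fun s kw =>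
      if PySem.Str.isIn "_" kw then
        ((PySem.Str.split? kw "_").getD []).foldl
          (fun s p => if p ∈ keywords then PySem.Set.add s p else s) s
      else s) PySem.Set.empty
  to_remove.foldl (fun l w => (PySem.List.remove? l w).getD l) keywords

-- ===== PORT B =====
def remove_partial_words_alt (keywords : List String) : List String :=
  let present : PySem.Set String := PySem.Set.ofList keywords
  let drop : PySem.Set String := PySem.Set.ofList
    (((keywords.filter (fun kw => PySem.Str.isIn "_" kw)).flatMap
        (fun kw => (PySem.Str.split? kw "_").getD [])).filter
      (fun p => PySem.Set.contains present p))
  (keywords.foldl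
    (fun (acc : List String × PySem.Set String) w =>
      if PySem.Set.contains acc.2 w then (acc.1, PySem.Set.discard acc.2 w)
      else (acc.1 ++ [w], acc.2)) ([], drop)).1

-- ===== PRECONDITION & SPEC =====
def Spec_remove_partial_words (keywords : List String) (out : List String) : Prop := out = remove_partial_words_alt keywords
instance (keywords : List String) (out : List String) : Decidable (Spec_remove_partial_words keywords out) := by unfold Spec_remove_partial_words; infer_instance

-- ===== CLAIM (what is proved, stated in full; the proofs are below) =====
def Claim_equal_remove_partial_words : Prop := ∀ (keywords : List String), Dom_remove_partial_words keywords → Spec_remove_partial_words keywords (remove_partial_words keywords)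

-- ===== LEMMAS AND PROOFS =====

-- A's inner loop over the parts of one keyword = filter-then-add
theorem inner_add_filter (pred : String → Bool) (ps : List String) (s : PySem.Set String) :
    ps.foldl (fun s p => if pred p then PySem.Set.add s p else s) s
      = (ps.filter pred).foldl PySem.Set.add s := by
  induction ps generalizing s with
  | nil => rfl
  | cons p t ih =>
      simp only [List.foldl_cons, List.filter_cons]
      by_cases h : pred p
      · simp [h, ih]
      · simp [h, ih]

-- the drop-set built by A's nested loops = the filtered flatMap B's comprehension builds
theorem outer_add_filter (c : String → Bool) (parts : String → List String)
    (pred : String → Bool) (xs : List String) (s : PySem.Set String) :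
    xs.foldl (fun s kw =>
        if c kw then
          (parts kw).foldl (fun s p => if pred p then PySem.Set.add s p else s) s
        else s) s
      = (((xs.filter c).flatMap parts).filter pred).foldl PySem.Set.add s := by
  induction xs generalizing s with
  | nil => rfl
  | cons kw t ih =>
      by_cases h : c kw
      · simp only [List.foldl_cons, List.filter_cons, h, if_true, List.flatMap_cons,
          List.filter_append, List.foldl_append]
        rw [ih, inner_add_filter]
      · simp only [List.foldl_cons, List.filter_cons, h, Bool.false_eq_true, if_false]
        exact ih s

-- Python `(remove? l w).getD l` is List.erase (erase of an absent element is the identity)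
theorem removeGetD_eq_erase (l : List String) (w : String) :
    (PySem.List.remove? l w).getD l = l.erase w := by
  by_cases h : w ∈ l
  · rw [PySem.List.remove?_eq_some_erase l w h]; rfl
  · rw [(PySem.List.remove?_eq_none_iff l w).2 h, List.erase_of_not_mem h]; rfl

-- how a fold of erasures acts on a cons
theorem foldl_erase_cons (s : List String) (a : String) (t : List String) :
    s.foldl List.erase (a :: t)
      = if a ∈ s then (s.erase a).foldl List.erase t else a :: s.foldl List.erase t := by
  induction s generalizing t with
  | nil => simp
  | cons w s' ih =>
      rw [List.foldl_cons]
      by_cases hw : w = a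
      · subst hw
        rw [List.erase_cons_head]
        simp [List.erase_cons_head]
      · have h1 : (a :: t).erase w = a :: t.erase w :=
          List.erase_cons_tail (by simp [Ne.symm hw])
        have h2 : (w :: s').erase a = w :: s'.erase a :=
          List.erase_cons_tail (by simp [hw])
        rw [h1, List.foldl_cons, ih]
        by_cases ha : a ∈ s'
        · rw [if_pos ha, if_pos (List.mem_cons_of_mem w ha), h2, List.foldl_cons]
        · rw [if_neg ha, if_neg (by simp [Ne.symm hw, ha])]

theorem foldl_erase_nil (s : List String) : s.foldl List.erase ([] : List String) = [] := by
  induction s with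
  | nil => rfl
  | cons w t ih => simp [ih]

-- B's single pass (with a Nodup drop list) = A's fold of erasures
theorem pass_eq_foldl_erase (l : List String) (r : List String) (s : PySem.Set String)
    (hs : s.Nodup) :
    (l.foldl
      (fun (acc : List String × PySem.Set String) w =>
        if PySem.Set.contains acc.2 w then (acc.1, PySem.Set.discard acc.2 w)
        else (acc.1 ++ [w], acc.2)) (r, s)).1
      = r ++ s.foldl List.erase l := by
  induction l generalizing r s with
  | nil => simp [foldl_erase_nil]
  | cons a t ih =>
      rw [foldl_erase_cons]
      by_cases ha : a ∈ s
      · have hc : PySem.Set.contains s a = true := (PySem.Set.contains_iff s a).2 ha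
        have hd : PySem.Set.discard s a = s.erase a := by
          simp only [PySem.Set.discard, hs.erase_eq_filter a]
          rfl
        simp only [List.foldl_cons, hc, if_true, hd]
        rw [ih r (s.erase a) (hs.erase a)]
        simp [ha]
      · have hc : PySem.Set.contains s a = false := by
          cases hb : PySem.Set.contains s a
          · rfl
          · exact absurd ((PySem.Set.contains_iff s a).1 hb) ha
        simp only [List.foldl_cons, hc, Bool.false_eq_true, if_false]
        rw [ih (r ++ [a]) s hs]
        simp [ha]

-- A's membership test `p ∈ keywords` = B's `p in set(keywords)`
theorem pred_eq (keywords : List String) (p : String) :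
    (decide (p ∈ keywords)) = PySem.Set.contains (PySem.Set.ofList keywords) p := by
  by_cases h : p ∈ keywords
  · simp [h]
  · have hm : p ∉ PySem.Set.ofList keywords := fun hc => h ((PySem.Set.mem_ofList keywords p).1 hc)
    have hf : PySem.Set.contains (PySem.Set.ofList keywords) p = false := by
      cases hb : PySem.Set.contains (PySem.Set.ofList keywords) p
      · rfl
      · exact absurd ((PySem.Set.contains_iff _ p).1 hb) hm
    simp [h]

-- A's second loop, step by step, is a fold of erasures
theorem foldl_removeGetD_eq_foldl_erase (s : List String) (l : List String) :
    s.foldl (fun l w => (PySem.List.remove? l w).getD l) l = s.foldl List.erase l := by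
  induction s generalizing l with
  | nil => rfl
  | cons w t _ => simp [List.foldl_cons, removeGetD_eq_erase]

-- ===== VERDICT (by name: the statement is the Claim_ definition above) =====
theorem remove_partial_words_spec : Claim_equal_remove_partial_words := by
  intro keywords _
  unfold Spec_remove_partial_words remove_partial_words remove_partial_words_alt
  set dl : List String :=
    (((keywords.filter (fun kw => PySem.Str.isIn "_" kw)).flatMap
        (fun kw => (PySem.Str.split? kw "_").getD [])).filter
      (fun p => PySem.Set.contains (PySem.Set.ofList keywords) p)) with hdl
  have hA :
      keywords.foldl (fun s kw =>
        if PySem.Str.isIn "_" kw then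
          ((PySem.Str.split? kw "_").getD []).foldl
            (fun s p => if p ∈ keywords then PySem.Set.add s p else s) s
        else s) PySem.Set.empty = PySem.Set.ofList dl := by
    have h2 : (fun (s : PySem.Set String) (kw : String) =>
          if PySem.Str.isIn "_" kw then
            ((PySem.Str.split? kw "_").getD []).foldl
              (fun s p => if p ∈ keywords then PySem.Set.add s p else s) s
          else s)
        = (fun (s : PySem.Set String) (kw : String) =>
            if PySem.Str.isIn "_" kw then
              ((PySem.Str.split? kw "_").getD []).foldl
                (fun s p =>
                  if PySem.Set.contains (PySem.Set.ofList keywords) p then PySem.Set.add s p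
                  else s) s
            else s) := by
      have hfun : (fun (s : PySem.Set String) (p : String) =>
            if p ∈ keywords then PySem.Set.add s p else s)
          = (fun (s : PySem.Set String) (p : String) =>
              if PySem.Set.contains (PySem.Set.ofList keywords) p then PySem.Set.add s p
              else s) := by
        funext s p
        rw [← pred_eq keywords p]
        simp
      funext s kw
      rw [hfun]
    rw [h2, outer_add_filter (fun kw => PySem.Str.isIn "_" kw)
      (fun kw => (PySem.Str.split? kw "_").getD [])
      (fun p => PySem.Set.contains (PySem.Set.ofList keywords) p)
      keywords PySem.Set.empty, hdl, PySem.Set.ofList_eq_foldl]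
    rfl
  rw [hA, pass_eq_foldl_erase keywords [] (PySem.Set.ofList dl) (PySem.Set.nodup_ofList dl),
    foldl_removeGetD_eq_foldl_erase]
  simp
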